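-- pv_equiv track=rewrite | github.com/ariel-ortiz/pyconlatam2022_pyscript | pyconlatam2022.py | espita
-- ===== SOURCE A (Python) =====
-- def espita(d):
--     """Regresa una lista con los primeros d dígitos
--        de pi utilizando el algoritmo de espita
--        diseñado por Jeremy Gibbons. Implementación
--        de John Zelle con ligeras alteraciones por
--        Ariel Ortiz.
--        http://www.cs.ox.ac.uk/people/jeremy.gibbons/publications/spigot.pdf
--     """
--     x = []
--     q, r, t, k, n, l_ = 1, 0, 1, 1, 3, 3
--     while len(x) < d:
--         if 4*q+r-t < n*t:
--             x.append(n)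
--             q, r, t, k, n, l_ = (
--                 10*q, 10*(r-n*t), t, k,
--                 (10*(3*q+r))//t-10*n, l_)
--         else:
--             q, r, t, k, n, l_ = (
--                 q*k, (2*q+r)*l_, t*l_, k+1,
--                 (q*(7*k+2)+r*l_)//(t*l_), l_+2)
--     return x
-- ===== SOURCE B (Python) =====
-- def espita(d):
--     """Primeros d digitos de pi por refinamiento de una aproximacion
--        entera de punto fijo: y ~ floor(pi * 10^j), con residuo rho
--        con denominador c y holgura escalada g (evaluar la cola en
--        4 en vez de 3 agrega g al numerador). Cada termino de la serie
--        refina (y, rho) con un divmod de cociente pequeno; un digito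
--        esta listo cuando la holgura ya no puede alterar y
--        (rho + g < c) y vale y - 10*v, la diferencia con la
--        aproximacion anterior v; nada se resta jamas del estado."""
--     y, rho, c = 3, 0, 1   # y*c + rho == numerador escalado evaluado en 3
--     g = 1                 # holgura: numerador evaluado en 4 == y*c + rho + g
--     v, k = 0, 1           # aproximacion ya emitida y contador de terminos
--     out = []
--     for _ in range(d):
--         while rho + g >= c:              # y aun puede cambiar: refinar
--             e, rho = divmod((2*k+1)*rho + (k-1)*g, (2*k+1)*c)
--             y, g, c, k = y + e, k*g, (2*k+1)*c, k + 1
--         out.append(y - 10*v)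
--         e, rho = divmod(10*rho, c)
--         v, y, g = y, 10*y + e, 10*g
--     return out
-- ===== Notes on version B (the rewrite author's own statement) =====
-- stated objective: alternative
-- what changed: B replaces A's rational-state spigot (q,r,t with a digit candidate n maintained by full-precision floor divisions and digit removal from the numerator) by fixed-point refinement: it carries an integer approximation y of pi scaled by a power of ten, with remainder rho and slack g over the denominator c, refines (y,rho) per series term with one small-quotient divmod, emits each digit as the difference of successive approximations once the slack can no longer change y, and never subtracts emitted digits from the state; decomposed as an outer per-digit loop with an inner refining loop.
import Mathlib
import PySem

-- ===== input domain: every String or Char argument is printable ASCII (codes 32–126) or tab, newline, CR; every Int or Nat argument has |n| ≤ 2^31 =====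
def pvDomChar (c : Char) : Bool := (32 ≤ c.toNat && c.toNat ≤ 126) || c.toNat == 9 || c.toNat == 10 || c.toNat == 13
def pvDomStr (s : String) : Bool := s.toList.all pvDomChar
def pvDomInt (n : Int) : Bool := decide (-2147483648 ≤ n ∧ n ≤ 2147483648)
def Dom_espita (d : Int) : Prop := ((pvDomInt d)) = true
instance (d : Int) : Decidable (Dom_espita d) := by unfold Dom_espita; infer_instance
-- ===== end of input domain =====

-- B replaces A's rational spigot state by fixed-point refinement: an integer approximation
-- y of pi scaled by a power of ten, with remainder rho, denominator c and slack g, refined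
-- by small-quotient divmods; each digit is the difference of successive approximations
-- (objective: alternative).
-- Fuel in both ports is only a totality guard (the Python loops' termination is a
-- number-theoretic fact); both ports consume one fuel unit per loop iteration.

-- ===== PORT A =====
def espitaLoop (d : Int) (fuel : Nat) (x : List Int) (q r t k n l : Int) : List Int :=
  match fuel with
  | 0 => x
  | f+1 =>
    if (x.length : Int) < d then
      if 4*q+r-t < n*t then
        espitaLoop d f (x ++ [n]) (10*q) (10*(r-n*t)) t k
          (PySem.Int.floordiv (10*(3*q+r)) t - 10*n) l
      else
        espitaLoop d f x (q*k) ((2*q+r)*l) (t*l) (k+1)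
          (PySem.Int.floordiv (q*(7*k+2)+r*l) (t*l)) (l+2)
    else x

def espita (d : Int) : List Int := espitaLoop d (5*d+20).toNat [] 1 0 1 1 3 3

-- ===== PORT B =====
-- inner while-loop of B: refine the approximation until the slack cannot change y
def espitaRefine (fuel : Nat) (y rho c g k : Int) : Nat × Int × Int × Int × Int × Int :=
  match fuel with
  | 0 => (0, y, rho, c, g, k)
  | f+1 =>
    if c ≤ rho + g then
      espitaRefine f
        (y + PySem.Int.floordiv ((2*k+1)*rho + (k-1)*g) ((2*k+1)*c))
        (PySem.Int.mod ((2*k+1)*rho + (k-1)*g) ((2*k+1)*c))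
        ((2*k+1)*c) (k*g) (k+1)
    else (f+1, y, rho, c, g, k)

-- outer for-loop of B: one digit per step, the difference of successive approximations
def espitaOut (cnt : Nat) (fuel : Nat) (out : List Int) (y rho c g v k : Int) : List Int :=
  match cnt with
  | 0 => out
  | cnt+1 =>
    match espitaRefine fuel y rho c g k with
    | (0, _, _, _, _, _) => out
    | (f+1, y, rho, c, g, k) =>
      espitaOut cnt f (out ++ [y - 10*v])
        (10*y + PySem.Int.floordiv (10*rho) c) (PySem.Int.mod (10*rho) c) c (10*g) y k

def espita_alt (d : Int) : List Int := espitaOut d.toNat (5*d+20).toNat [] 3 0 1 1 0 1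

-- ===== PRECONDITION & SPEC =====
def Spec_espita (d : Int) (out : List Int) : Prop := out = espita_alt d
instance (d : Int) (out : List Int) : Decidable (Spec_espita d out) := by unfold Spec_espita; infer_instance

-- ===== CLAIM (what is proved, stated in full; the proofs are below) =====
def Claim_equal_espita : Prop := ∀ (d : Int), Dom_espita d → Spec_espita d (espita d)

-- ===== LEMMAS AND PROOFS =====

-- floor division shifts by integer multiples of the divisor
theorem fd_shift (X m t : Int) (ht : t ≠ 0) :
    PySem.Int.floordiv (X + m*t) t = PySem.Int.floordiv X t + m := by
  unfold PySem.Int.floordiv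
  exact Int.add_mul_fdiv_right X m ht

-- a remainder below the (positive) divisor has floor quotient zero
theorem fd_small (r c : Int) (h0 : 0 ≤ r) (h1 : r < c) : PySem.Int.floordiv r c = 0 := by
  have hc : (0:Int) < c := by omega
  exact (PySem.Int.floordiv_eq_iff_of_pos hc).mpr ⟨by simpa using h0, by simpa using h1⟩

-- one refining step commutes with B's outer loop (it just unrolls the inner loop once)
theorem espitaOut_refine (cnt f : Nat) (x : List Int) (y rho c g v k : Int)
    (h : c ≤ rho + g) :
    espitaOut (cnt+1) (f+1) x y rho c g v k =
    espitaOut (cnt+1) f x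
      (y + PySem.Int.floordiv ((2*k+1)*rho + (k-1)*g) ((2*k+1)*c))
      (PySem.Int.mod ((2*k+1)*rho + (k-1)*g) ((2*k+1)*c))
      ((2*k+1)*c) (k*g) v (k+1) := by
  conv_lhs => rw [espitaOut]
  conv_rhs => rw [espitaOut]
  rw [espitaRefine, if_pos h]

-- main loop correspondence: A's state (q, r, t, n, l) is B's state (y, rho, c, g, v, k)
-- through q = g, t = c, r = y*c + rho - 3*g - 10*v*c, n = y - 10*v, l = 2k+1.
theorem espita_main (d : Int) : ∀ (f : Nat) (y rho c g v k : Int) (x : List Int) (cnt : Nat),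
    0 ≤ rho → rho < c → 1 ≤ k →
    ((cnt : Int) = d - x.length ∨ (d ≤ (x.length : Int) ∧ cnt = 0)) →
    espitaLoop d f x g (y*c + rho - 3*g - 10*v*c) c k (y - 10*v) (2*k+1) =
    espitaOut cnt f x y rho c g v k := by
  intro f
  induction f with
  | zero =>
    intro y rho c g v k x cnt _ _ _ _
    cases cnt with
    | zero => rw [espitaLoop, espitaOut]
    | succ cnt => rw [espitaLoop, espitaOut, espitaRefine]
  | succ f ih =>
    intro y rho c g v k x cnt h0 h1 hk hcnt
    have hc : (0:Int) < c := by omega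
    have hc0 : c ≠ 0 := by omega
    -- A's digit-safety test is exactly "the slack cannot change y" (pure algebra)
    have htest : (4*g + (y*c + rho - 3*g - 10*v*c) - c < (y - 10*v)*c) ↔ rho + g < c := by
      have e : (y - 10*v)*c = y*c - 10*v*c := by ring
      omega
    cases cnt with
    | zero =>
      have hnlt : ¬ ((x.length : Int) < d) := by omega
      rw [espitaLoop, if_neg hnlt, espitaOut]
    | succ cnt =>
      have hxd : (x.length : Int) < d := by omega
      rw [espitaLoop, if_pos hxd]
      by_cases hstab : rho + g < c
      · -- stable: A emits n = y - 10v and B emits the same digit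
        rw [if_pos (htest.mpr hstab)]
        conv_rhs => rw [espitaOut, espitaRefine, if_neg (by omega)]
        have hdm := PySem.Int.floordiv_mul_add_mod (10*rho) c
        have hm0 : 0 ≤ PySem.Int.mod (10*rho) c := PySem.Int.mod_nonneg _ hc
        have hm1 : PySem.Int.mod (10*rho) c < c := PySem.Int.mod_lt _ hc
        set e := PySem.Int.floordiv (10*rho) c with hdefe
        set rho' := PySem.Int.mod (10*rho) c with hdefr
        have er : 10*((y*c + rho - 3*g - 10*v*c) - (y - 10*v)*c) =
            (10*y + e)*c + rho' - 3*(10*g) - 10*y*c := by linear_combination -hdm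
        have en : PySem.Int.floordiv (10*(3*g + (y*c + rho - 3*g - 10*v*c))) c
            - 10*(y - 10*v) = (10*y + e) - 10*y := by
          have h2 : 10*(3*g + (y*c + rho - 3*g - 10*v*c)) =
              rho' + (10*y - 100*v + e)*c := by linear_combination -hdm
          rw [h2, fd_shift _ _ _ hc0, fd_small _ _ hm0 hm1]
          ring
        rw [er, en]
        exact ih (10*y + e) rho' c (10*g) y k (x ++ [y - 10*v]) cnt hm0 hm1 hk
          (by rcases hcnt with h | h
              · left; simp [List.length_append] at *; omega
              · omega)
      · -- unstable: A consumes one series term and B refines once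
        rw [if_neg (by rw [htest]; exact hstab)]
        rw [espitaOut_refine cnt f x y rho c g v k (by omega)]
        have hcc : (0:Int) < (2*k+1)*c := by positivity
        have hcc0 : (2*k+1)*c ≠ 0 := by omega
        have hdm := PySem.Int.floordiv_mul_add_mod ((2*k+1)*rho + (k-1)*g) ((2*k+1)*c)
        have hm0 : 0 ≤ PySem.Int.mod ((2*k+1)*rho + (k-1)*g) ((2*k+1)*c) :=
          PySem.Int.mod_nonneg _ hcc
        have hm1 : PySem.Int.mod ((2*k+1)*rho + (k-1)*g) ((2*k+1)*c) < (2*k+1)*c :=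
          PySem.Int.mod_lt _ hcc
        set e := PySem.Int.floordiv ((2*k+1)*rho + (k-1)*g) ((2*k+1)*c) with hdefe
        set rho' := PySem.Int.mod ((2*k+1)*rho + (k-1)*g) ((2*k+1)*c) with hdefr
        have eq2 : g*k = k*g := by ring
        have et : c*(2*k+1) = (2*k+1)*c := by ring
        have er : (2*g + (y*c + rho - 3*g - 10*v*c))*(2*k+1) =
            (y + e)*((2*k+1)*c) + rho' - 3*(k*g) - 10*v*((2*k+1)*c) := by
          linear_combination -hdm
        have en : PySem.Int.floordiv (g*(7*k+2) + (y*c + rho - 3*g - 10*v*c)*(2*k+1))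
              (c*(2*k+1)) = (y + e) - 10*v := by
          have h2 : g*(7*k+2) + (y*c + rho - 3*g - 10*v*c)*(2*k+1) =
              rho' + ((y + e) - 10*v)*((2*k+1)*c) := by linear_combination -hdm
          rw [h2, et, fd_shift _ _ _ hcc0, fd_small _ _ hm0 hm1]
          ring
        have el : (2*k+1)+2 = 2*(k+1)+1 := by ring
        rw [eq2, er, en, et, el]
        exact ih (y + e) rho' ((2*k+1)*c) (k*g) v (k+1) x (cnt+1)
          hm0 hm1 (by omega) hcnt

-- ===== VERDICT (by name: the statement is the Claim_ definition above) =====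
theorem espita_spec : Claim_equal_espita := by
  intro d _
  unfold Spec_espita espita espita_alt
  have := espita_main d (5*d+20).toNat 3 0 1 1 0 1 [] d.toNat
    (by norm_num) (by norm_num) (by norm_num) (by simp; omega)
  simpa using this
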